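-- pv_equiv track=rewrite | github.com/jerzy-kraszewski/sprague-grundy-periodicity-analysis | utils.py | detect_arithmetic_period
-- ===== SOURCE A (Python) =====
-- def detect_arithmetic_period(grundy, max_p=None, max_d=None):
--     """
--     Detect the smallest (l, p, d) such that for all n >= l:
--        grundy[n + p] == grundy[n] + d.
--
--     This is a naive approach, checking all l, p, d within the
--     provided bounds. For large sequences, this can be slow.
--
--     Parameters:
--     -----------
--     grundy : list[int]
--         The Sprague-Grundy sequence.
--     max_p  : int or None
--         Maximum period to check. If None, periods up to length of `grundy` - 1 will be checked.
--
--     Returns: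
--     --------
--     (l, p, d) if an arithmetic period is found,
--     or (None, None, None) if no arithmetic period is found within search bounds.
--     """
--     n = len(grundy)
--     if max_p is None:
--         max_p = n // 2
--
--     for l in range(n):
--         for p in range(1, min(max_p + 1, n - l)):
--             d_candidate = grundy[l + p] - grundy[l]
--             is_arith_periodic = True
--             for i in range(l, n - p):
--                 if grundy[i] + d_candidate != grundy[i + p]:
--                     is_arith_periodic = False
--                     break
--             if is_arith_periodic:
--                 return (l, p, d_candidate)
--
--     return (None, None, None)
-- ===== SOURCE B (Python) =====
-- def detect_arithmetic_period(grundy, max_p=None, max_d=None):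
--     """Faster exact re-implementation: for each period p, a backward scan finds
--     l0(p), the start of the longest suffix on which grundy[i+p]-grundy[i] is
--     constant (cost = that suffix's length, not n); the answer is the p with
--     minimal l0(p) (earliest p on ties), stopping as soon as l0 hits 0 -- which
--     is exactly the lexicographically first (l, p) the naive triple loop returns."""
--     n = len(grundy)
--     if max_p is None:
--         max_p = n // 2
--     best_l = None
--     best_p = None
--     for p in range(1, min(max_p, n - 1) + 1):
--         j = n - p - 1
--         while j > 0 and grundy[j + p] - grundy[j] == grundy[j - 1 + p] - grundy[j - 1]:
--             j -= 1
--         if best_l is None or j < best_l: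
--             best_l = j
--             best_p = p
--         if best_l == 0:
--             break
--     if best_l is None:
--         return (None, None, None)
--     return (best_l, best_p, grundy[best_l + best_p] - grundy[best_l])
-- ===== Notes on version B (the rewrite author's own statement) =====
-- stated objective: faster
-- what changed: Instead of A's triple loop (for each l, for each p, rescan the whole tail), B does one backward scan per period p that finds l0(p), the start of the longest suffix where grundy[i+p]-grundy[i] is constant (costing only that suffix's length), keeps the p minimising l0(p) (earliest p on ties) and stops once l0 hits 0 -- exactly A's lexicographically-first (l, p, d).
import Mathlib
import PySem

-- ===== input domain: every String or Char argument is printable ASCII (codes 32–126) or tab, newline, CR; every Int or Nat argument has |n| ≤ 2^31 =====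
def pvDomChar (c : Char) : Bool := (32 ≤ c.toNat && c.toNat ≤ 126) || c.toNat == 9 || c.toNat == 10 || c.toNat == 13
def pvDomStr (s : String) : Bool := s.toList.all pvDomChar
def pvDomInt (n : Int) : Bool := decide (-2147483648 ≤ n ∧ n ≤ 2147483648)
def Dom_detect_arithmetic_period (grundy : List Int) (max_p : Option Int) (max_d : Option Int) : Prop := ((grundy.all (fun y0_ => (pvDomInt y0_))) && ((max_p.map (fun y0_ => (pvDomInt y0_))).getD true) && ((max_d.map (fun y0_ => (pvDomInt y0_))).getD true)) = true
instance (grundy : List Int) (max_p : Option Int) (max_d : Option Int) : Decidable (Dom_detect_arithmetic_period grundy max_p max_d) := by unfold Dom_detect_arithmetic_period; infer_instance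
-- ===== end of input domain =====

-- B replaces A's triple loop by, for each period p, ONE linear pass that finds the
-- start of the longest suffix on which grundy[i+p]-grundy[i] is constant, then takes
-- the pair minimal in l (earliest p on ties); same return value, measured faster.

-- ===== PORT A =====
-- A's inner `for i in range(l, n - p): if …: break` loop (short-circuiting all)
def pvA_check (g : List Int) (n l p d : Int) : Bool :=
  (PySem.List.pyRange l (n - p) 1).all (fun i =>
    PySem.List.pyGetD g i 0 + d == PySem.List.pyGetD g (i + p) 0)

def detect_arithmetic_period (grundy : List Int) (max_p : Option Int) (max_d : Option Int) : Option Int × Option Int × Option Int :=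
  let n : Int := grundy.length
  let P : Int := match max_p with | none => PySem.Int.floordiv n 2 | some m => m
  match (PySem.List.pyRange 0 n 1).findSome? (fun l =>
      (PySem.List.pyRange 1 (min (P + 1) (n - l)) 1).findSome? (fun p =>
        let d := PySem.List.pyGetD grundy (l + p) 0 - PySem.List.pyGetD grundy l 0
        if pvA_check grundy n l p d then some (l, p, d) else none)) with
  | some (l, p, d) => (some l, some p, some d)
  | none => (none, none, none)

-- ===== PORT B =====
-- B's backward `j = n-p-1; while j > 0 and diff(j) == diff(j-1): j -= 1` scan,
-- recursion on j (the Nat argument is j itself)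
def pvB_scan (g : List Int) (p : Int) : Nat → Int
  | 0 => 0
  | Nat.succ k =>
      let j : Int := ((k + 1 : Nat) : Int)
      if PySem.List.pyGetD g (j + p) 0 - PySem.List.pyGetD g j 0 ==
         PySem.List.pyGetD g (j - 1 + p) 0 - PySem.List.pyGetD g (j - 1) 0
      then pvB_scan g p k else j

def pvB_l0 (g : List Int) (n p : Int) : Int := pvB_scan g p (n - p - 1).toNat

-- B's p-loop with `if best_l == 0: break`, recursion over the remaining range
def pvB_loop (g : List Int) (n : Int) : List Int → Option (Int × Int) → Option (Int × Int)
  | [], best => best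
  | p :: ps, best =>
      let l0 := pvB_l0 g n p
      let best' : Int × Int :=
        match best with
        | none => (l0, p)
        | some (bl, bp) => if l0 < bl then (l0, p) else (bl, bp)
      if best'.1 == 0 then some best' else pvB_loop g n ps (some best')

def detect_arithmetic_period_alt (grundy : List Int) (max_p : Option Int) (max_d : Option Int) : Option Int × Option Int × Option Int :=
  let n : Int := grundy.length
  let P : Int := match max_p with | none => PySem.Int.floordiv n 2 | some m => m
  match pvB_loop grundy n (PySem.List.pyRange 1 (min P (n - 1) + 1) 1) none with
  | some (l, p) =>
      (some l, some p, some (PySem.List.pyGetD grundy (l + p) 0 - PySem.List.pyGetD grundy l 0))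
  | none => (none, none, none)

-- ===== PRECONDITION & SPEC =====
def Spec_detect_arithmetic_period (grundy : List Int) (max_p : Option Int) (max_d : Option Int) (out : Option Int × Option Int × Option Int) : Prop := out = detect_arithmetic_period_alt grundy max_p max_d
instance (grundy : List Int) (max_p : Option Int) (max_d : Option Int) (out : Option Int × Option Int × Option Int) : Decidable (Spec_detect_arithmetic_period grundy max_p max_d out) := by unfold Spec_detect_arithmetic_period; infer_instance

-- ===== CLAIM (what is proved, stated in full; the proofs are below) =====
def Claim_equal_detect_arithmetic_period : Prop := ∀ (grundy : List Int) (max_p : Option Int) (max_d : Option Int), Dom_detect_arithmetic_period grundy max_p max_d → Spec_detect_arithmetic_period grundy max_p max_d (detect_arithmetic_period grundy max_p max_d)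

-- ===== LEMMAS AND PROOFS =====

-- the difference sequence at period p
def pvD (g : List Int) (p i : Int) : Int :=
  PySem.List.pyGetD g (i + p) 0 - PySem.List.pyGetD g i 0

-- A's inner loop succeeds iff pvD is constant (= its value at l) on [l, n-p)
theorem pvA_check_iff (g : List Int) (n l p : Int) :
    pvA_check g n l p (PySem.List.pyGetD g (l + p) 0 - PySem.List.pyGetD g l 0) = true ↔
      ∀ i, l ≤ i → i < n - p → pvD g p i = pvD g p l := by
  simp only [pvA_check, List.all_eq_true, PySem.List.mem_pyRange_one, beq_iff_eq, pvD]
  constructor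
  · intro h i h1 h2; have := h i ⟨h1, h2⟩; omega
  · intro h i hi; have := h i hi.1 hi.2; omega

-- characterisation of B's backward scan
theorem pvB_scan_spec (g : List Int) (p : Int) (k : Nat) :
    (0 ≤ pvB_scan g p k ∧ pvB_scan g p k ≤ (k : Int)) ∧
      (∀ i, pvB_scan g p k < i → i ≤ (k : Int) → pvD g p i = pvD g p (i - 1)) ∧
      (pvB_scan g p k = 0 ∨
        (1 ≤ pvB_scan g p k ∧ pvD g p (pvB_scan g p k) ≠ pvD g p (pvB_scan g p k - 1))) := by
  induction k with
  | zero =>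
    refine ⟨⟨by simp [pvB_scan], by simp [pvB_scan]⟩, ?_, Or.inl (by simp [pvB_scan])⟩
    intro i h1 h2
    simp only [pvB_scan] at h1
    omega
  | succ k ih =>
    obtain ⟨⟨hge, hle⟩, hstep, hwit⟩ := ih
    by_cases hd : PySem.List.pyGetD g (((k + 1 : Nat) : Int) + p) 0 -
          PySem.List.pyGetD g ((k + 1 : Nat) : Int) 0 =
        PySem.List.pyGetD g (((k + 1 : Nat) : Int) - 1 + p) 0 -
          PySem.List.pyGetD g (((k + 1 : Nat) : Int) - 1) 0
    · have hs : pvB_scan g p (k + 1) = pvB_scan g p k := by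
        simp only [pvB_scan]
        rw [if_pos (by exact beq_iff_eq.mpr hd)]
      rw [hs]
      refine ⟨⟨hge, by push_cast; omega⟩, ?_, hwit⟩
      intro i h1 h2
      push_cast at h2
      rcases lt_or_eq_of_le h2 with h | h
      · exact hstep i h1 (by omega)
      · subst h
        simpa [pvD] using hd
    · have hs : pvB_scan g p (k + 1) = ((k + 1 : Nat) : Int) := by
        simp only [pvB_scan]
        rw [if_neg (by simpa using hd)]
      rw [hs]
      refine ⟨⟨by push_cast; omega, le_refl _⟩, ?_, Or.inr ⟨by push_cast; omega, ?_⟩⟩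
      · intro i h1 h2; omega
      · simpa [pvD] using hd

theorem pvB_l0_nonneg (g : List Int) (n p : Int) : 0 ≤ pvB_l0 g n p :=
  (pvB_scan_spec g p (n - p - 1).toNat).1.1

theorem pvB_l0_spec (g : List Int) (n p : Int) (h2 : p ≤ n - 1) :
    (0 ≤ pvB_l0 g n p ∧ pvB_l0 g n p ≤ n - p - 1) ∧
      (∀ i, pvB_l0 g n p < i → i < n - p → pvD g p i = pvD g p (i - 1)) ∧
      (pvB_l0 g n p = 0 ∨ (1 ≤ pvB_l0 g n p ∧ pvD g p (pvB_l0 g n p) ≠ pvD g p (pvB_l0 g n p - 1))) := by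
  obtain ⟨⟨h1, hle⟩, hstep, hwit⟩ := pvB_scan_spec g p (n - p - 1).toNat
  have hk : (((n - p - 1).toNat : Nat) : Int) = n - p - 1 := by omega
  rw [hk] at hle hstep
  exact ⟨⟨h1, hle⟩, fun i hi1 hi2 => hstep i hi1 (by omega), hwit⟩

-- step-constancy on a suffix telescopes to constancy
theorem pvD_const_of_step (g : List Int) (p L e : Int)
    (hstep : ∀ i, L < i → i < e → pvD g p i = pvD g p (i - 1)) :
    ∀ (j : Nat) (a : Int), L ≤ a → a + (j : Int) < e → pvD g p (a + (j : Int)) = pvD g p a := by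
  intro j
  induction j with
  | zero => intro a _ _; norm_num
  | succ j ih =>
    intro a ha he
    have h1 : pvD g p (a + ((j+1 : Nat) : Int)) = pvD g p (a + (j : Int)) := by
      have hs := hstep (a + ((j+1 : Nat) : Int)) (by push_cast; omega) (by push_cast at he ⊢; omega)
      rw [hs]; congr 1; push_cast; ring
    rw [h1, ih a ha (by push_cast at he ⊢; omega)]

-- bridge: within A's loop bounds, A's inner check succeeds iff l is at or past B's l0
theorem check_iff_l0_le (g : List Int) (n l p : Int)
    (h1 : 1 ≤ p) (hl0 : 0 ≤ l) (hlp : l < n - p) :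
    (pvA_check g n l p (PySem.List.pyGetD g (l + p) 0 - PySem.List.pyGetD g l 0) = true ↔
      pvB_l0 g n p ≤ l) := by
  obtain ⟨⟨hL0, hL1⟩, hstep, hwit⟩ := pvB_l0_spec g n p (by omega)
  rw [pvA_check_iff]
  constructor
  · intro h
    by_contra hlt
    push_neg at hlt
    rcases hwit with h0 | ⟨hw1, hw2⟩
    · omega
    · have e1 := h (pvB_l0 g n p) (by omega) (by omega)
      have e2 := h (pvB_l0 g n p - 1) (by omega) (by omega)
      exact hw2 (by rw [e1, e2])
  · intro hle i hi1 hi2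
    have hj : i = l + ((i - l).toNat : Int) := by omega
    rw [hj]
    exact pvD_const_of_step g p (pvB_l0 g n p) (n - p) hstep (i - l).toNat l (by omega) (by omega)

-- findSome? over an int range: all-none, and value at the first hit
theorem findSome?_pyRange_none {α : Type} (f : Int → Option α) (a b : Int)
    (h : ∀ x, a ≤ x → x < b → f x = none) :
    (PySem.List.pyRange a b 1).findSome? f = none := by
  rw [List.findSome?_eq_none_iff]
  intro x hx
  rw [PySem.List.mem_pyRange_one] at hx
  exact h x hx.1 hx.2

theorem findSome?_pyRange_first {α : Type} (f : Int → Option α) (a b x0 : Int) (v : α)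
    (ha : a ≤ x0) (hb : x0 < b) (hv : f x0 = some v)
    (h : ∀ x, a ≤ x → x < x0 → f x = none) :
    (PySem.List.pyRange a b 1).findSome? f = some v := by
  rw [PySem.List.pyRange_one_append a x0 b ha (le_of_lt hb), List.findSome?_append,
      findSome?_pyRange_none f a x0 h, PySem.List.pyRange_one_cons hb]
  simp [hv]

-- B's p-loop over [1, c): empty case, invariant step, and argmin characterisation
theorem pvB_loop_none (g : List Int) (n : Int) (c : Int) (hc : c ≤ 1) :
    pvB_loop g n (PySem.List.pyRange 1 c 1) none = none := by
  rw [PySem.List.pyRange_one_eq_nil hc]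
  rfl

theorem pvB_loop_go (g : List Int) (n c : Int) :
    ∀ (k : Nat) (a bl bp : Int), a + (k : Int) = c → 1 ≤ bp → bp < a →
      bl = pvB_l0 g n bp →
      (∀ q, 1 ≤ q → q < a → bl ≤ pvB_l0 g n q) →
      (∀ q, 1 ≤ q → q < bp → bl < pvB_l0 g n q) →
      ∃ BL BP, pvB_loop g n (PySem.List.pyRange a c 1) (some (bl, bp)) = some (BL, BP) ∧
        1 ≤ BP ∧ BP < c ∧ BL = pvB_l0 g n BP ∧
        (∀ q, 1 ≤ q → q < c → BL ≤ pvB_l0 g n q) ∧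
        (∀ q, 1 ≤ q → q < BP → BL < pvB_l0 g n q) := by
  intro k
  induction k with
  | zero =>
    intro a bl bp hac hbp1 hbpa hbl hmin hfirst
    have hac' : a = c := by omega
    subst hac'
    rw [PySem.List.pyRange_one_eq_nil (le_refl a)]
    exact ⟨bl, bp, rfl, hbp1, by omega, hbl, hmin, hfirst⟩
  | succ k ih =>
    intro a bl bp hac hbp1 hbpa hbl hmin hfirst
    have hlt : a < c := by omega
    rw [PySem.List.pyRange_one_cons hlt]
    simp only [pvB_loop]
    by_cases himp : pvB_l0 g n a < bl
    · rw [if_pos himp]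
      by_cases hz : pvB_l0 g n a = 0
      · rw [if_pos (by simpa using hz)]
        refine ⟨pvB_l0 g n a, a, rfl, by omega, by omega, rfl, ?_, ?_⟩
        · intro q h1 h2
          rw [hz]
          exact pvB_l0_nonneg g n q
        · intro q h1 h2
          exact lt_of_lt_of_le himp (hmin q h1 h2)
      · rw [if_neg (by simpa using hz)]
        refine ih (a + 1) (pvB_l0 g n a) a (by push_cast at hac ⊢; omega) (by omega) (by omega) rfl ?_ ?_
        · intro q h1 h2
          rcases lt_or_eq_of_le (by omega : q ≤ a) with h | h
          · exact le_trans (le_of_lt himp) (hmin q h1 h)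
          · subst h; exact le_refl _
        · intro q h1 h2
          exact lt_of_lt_of_le himp (hmin q h1 h2)
    · rw [if_neg himp]
      push_neg at himp
      by_cases hz : bl = 0
      · rw [if_pos (by simpa using hz)]
        refine ⟨bl, bp, rfl, hbp1, by omega, hbl, ?_, hfirst⟩
        intro q h1 h2
        rw [hz]
        exact pvB_l0_nonneg g n q
      · rw [if_neg (by simpa using hz)]
        refine ih (a + 1) bl bp (by push_cast at hac ⊢; omega) hbp1 (by omega) hbl ?_ hfirst
        intro q h1 h2
        rcases lt_or_eq_of_le (by omega : q ≤ a) with h | h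
        · exact hmin q h1 h
        · subst h; omega

theorem pvB_loop_spec (g : List Int) (n : Int) (c : Int) (hc : 2 ≤ c) :
    ∃ bl bp, pvB_loop g n (PySem.List.pyRange 1 c 1) none = some (bl, bp) ∧
      1 ≤ bp ∧ bp < c ∧ bl = pvB_l0 g n bp ∧
      (∀ q, 1 ≤ q → q < c → bl ≤ pvB_l0 g n q) ∧
      (∀ q, 1 ≤ q → q < bp → bl < pvB_l0 g n q) := by
  rw [PySem.List.pyRange_one_cons (by omega : (1:Int) < c)]
  simp only [pvB_loop]
  by_cases hz : pvB_l0 g n 1 = 0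
  · rw [if_pos (by simpa using hz)]
    refine ⟨pvB_l0 g n 1, 1, rfl, le_refl _, by omega, rfl, ?_, ?_⟩
    · intro q h1 h2
      rw [hz]
      exact pvB_l0_nonneg g n q
    · intro q h1 h2; omega
  · rw [if_neg (by simpa using hz)]
    refine pvB_loop_go g n c (c - 2).toNat 2 (pvB_l0 g n 1) 1 (by omega) (le_refl _) (by omega) rfl ?_ ?_
    · intro q h1 h2
      have hq : q = 1 := by omega
      subst hq; exact le_refl _
    · intro q h1 h2; omega

-- the two match-expressions of the ports agree for every n and effective bound P
theorem pv_core (g : List Int) (n P : Int) :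
    (match (PySem.List.pyRange 0 n 1).findSome? (fun l =>
      (PySem.List.pyRange 1 (min (P + 1) (n - l)) 1).findSome? (fun p =>
        let d := PySem.List.pyGetD g (l + p) 0 - PySem.List.pyGetD g l 0
        if pvA_check g n l p d then some (l, p, d) else none)) with
    | some (l, p, d) => (some l, some p, some d)
    | none => ((none : Option Int), (none : Option Int), (none : Option Int))) =
    (match pvB_loop g n (PySem.List.pyRange 1 (min P (n - 1) + 1) 1) none with
    | some (l, p) => (some l, some p, some (PySem.List.pyGetD g (l + p) 0 - PySem.List.pyGetD g l 0))
    | none => ((none : Option Int), (none : Option Int), (none : Option Int))) := by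
  by_cases hc : min P (n - 1) + 1 ≤ 1
  · rw [pvB_loop_none g n _ hc, findSome?_pyRange_none]
    intro l hl0 hln
    apply findSome?_pyRange_none
    intro p hp1 hp2
    omega
  · push_neg at hc
    obtain ⟨bl, bp, hfold, hbp1, hbpc, hbl, hmin, hfirst⟩ :=
      pvB_loop_spec g n (min P (n - 1) + 1) (by omega)
    have hbpn : bp ≤ n - 1 := by omega
    obtain ⟨⟨hbl0', hblu'⟩, _, _⟩ := pvB_l0_spec g n bp hbpn
    have hbl0 : 0 ≤ bl := by omega
    have hblu : bl ≤ n - bp - 1 := by omega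
    rw [hfold]
    have hA : (PySem.List.pyRange 0 n 1).findSome? (fun l =>
      (PySem.List.pyRange 1 (min (P + 1) (n - l)) 1).findSome? (fun p =>
        let d := PySem.List.pyGetD g (l + p) 0 - PySem.List.pyGetD g l 0
        if pvA_check g n l p d then some (l, p, d) else none)) =
        some (bl, bp, PySem.List.pyGetD g (bl + bp) 0 - PySem.List.pyGetD g bl 0) := by
      refine findSome?_pyRange_first _ 0 n bl _ (by omega) (by omega) ?_ ?_
      · refine findSome?_pyRange_first _ 1 (min (P + 1) (n - bl)) bp _ hbp1 (by omega) ?_ ?_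
        · have hcheck : pvA_check g n bl bp
              (PySem.List.pyGetD g (bl + bp) 0 - PySem.List.pyGetD g bl 0) = true :=
            (check_iff_l0_le g n bl bp hbp1 hbl0 (by omega)).mpr (le_of_eq hbl.symm)
          simp only [hcheck, if_true]
        · intro p hp1 hp2
          simp only
          rw [if_neg]
          intro hch
          have hcl := (check_iff_l0_le g n bl p hp1 hbl0 (by omega)).mp hch
          have := hfirst p hp1 hp2
          omega
      · intro l hl0 hlb
        apply findSome?_pyRange_none
        intro p hp1 hp2
        simp only
        rw [if_neg]
        intro hch
        have hcl := (check_iff_l0_le g n l p hp1 hl0 (by omega)).mp hch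
        have := hmin p hp1 (by omega)
        omega
    rw [hA]

-- ===== VERDICT (by name: the statement is the Claim_ definition above) =====
theorem detect_arithmetic_period_spec : Claim_equal_detect_arithmetic_period := by
  intro grundy max_p max_d _
  unfold Spec_detect_arithmetic_period detect_arithmetic_period detect_arithmetic_period_alt
  cases max_p with
  | none => exact pv_core grundy (grundy.length : Int) (PySem.Int.floordiv (grundy.length : Int) 2)
  | some m => exact pv_core grundy (grundy.length : Int) m
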